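-- pv_equiv track=rewrite | github.com/Koweiyi/oi_problems | leetcode/lc1552.py | maxDistance
-- ===== SOURCE A (Python) =====
-- from bisect import bisect_left, bisect_right
-- from typing import List
--
-- def maxDistance(position: List[int], m: int) -> int:
--     # 一眼二分 先吃饭去喽
--     l = -1
--     r = 10 ** 10
--     position.sort()
--     def check(x: int) -> bool:
--         tot = 1
--         cur = 0
--         while cur < len(position):
--             nx = position[cur] + x
--             j = bisect_left(position, nx)
--             if j >= len(position):
--                 return False
--             cur = j
--             tot += 1
--             if tot == m:
--                 return True
--         return False
--
--     while l + 1 < r :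
--         mid = (l + r) // 2
--         if check(mid):
--             l = mid
--         else:
--             r = mid
--     return l
-- ===== SOURCE B (Python) =====
-- from typing import List
--
--
-- def maxDistance(position: List[int], m: int) -> int:
--     # Binary search the answer over [0, span] with a linear greedy counter
--     # (no bisect jumps, no fixed 10**10 ceiling).
--     position.sort()
--     if not position:
--         return -1
--
--     def count(x: int) -> int:
--         # balls placed greedily with minimum gap x
--         c = 1
--         last = position[0]
--         for p in position[1:]:
--             if p - last >= x:
--                 c += 1
--                 last = p
--         return c
--
--     lo, hi = 0, position[-1] - position[0]
--     while lo < hi: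
--         mid = (lo + hi + 1) // 2
--         if count(mid) >= m:
--             lo = mid
--         else:
--             hi = mid - 1
--     return lo
-- ===== Notes on version B (the rewrite author's own statement) =====
-- stated objective: alternative
-- what changed: B replaces A's bisect-jump feasibility check by a single linear greedy pass that counts placements, and replaces A's fixed (-1, 10**10) bisection by a lo/hi binary search bounded by the actual span [0, max-min] with an explicit count>=m test.
import Mathlib
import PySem

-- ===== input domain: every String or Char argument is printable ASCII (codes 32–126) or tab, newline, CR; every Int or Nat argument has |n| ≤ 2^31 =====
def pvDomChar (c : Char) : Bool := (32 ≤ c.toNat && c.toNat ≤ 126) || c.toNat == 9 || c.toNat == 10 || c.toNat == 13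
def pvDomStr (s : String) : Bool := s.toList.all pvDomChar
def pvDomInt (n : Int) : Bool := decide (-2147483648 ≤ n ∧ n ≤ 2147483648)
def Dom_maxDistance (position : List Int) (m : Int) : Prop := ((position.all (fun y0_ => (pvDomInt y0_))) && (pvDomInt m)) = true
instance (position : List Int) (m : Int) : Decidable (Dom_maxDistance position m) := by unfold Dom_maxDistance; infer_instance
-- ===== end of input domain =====

-- B re-solves the task with a span-bounded lo/hi binary search over a linear greedy
-- counter instead of A's fixed (-1,10**10) bisection over a bisect-jump check; the
-- equivalence is about the return value (both A and B sort `position` in place).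

-- ===== PORT A =====
-- A's inner `while cur < len(position)` loop: state (tot, cur); the fuel bounds the
-- iterations actually executed on any input admitted by Pre_ (for x ≥ 1 the cursor
-- strictly advances, ≤ length steps; otherwise tot reaches m after < m steps).
def checkALoop (s : List Int) (m x : Int) : Nat → Int → Nat → Bool
  | 0, _, _ => false
  | fuel+1, tot, cur =>
    if h : cur < s.length then
      let nx := s[cur] + x
      let j := PySem.List.bisectLeft s nx
      if s.length ≤ j then false
      else if tot + 1 = m then true
      else checkALoop s m x fuel (tot + 1) j
    else false

def checkA (s : List Int) (m x : Int) : Bool :=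
  checkALoop s m x (s.length + m.toNat + 2) 1 0

def bsA (s : List Int) (m l r : Int) : Int :=
  if h : l + 1 < r then
    let mid := PySem.Int.floordiv (l + r) 2
    if checkA s m mid then bsA s m mid r else bsA s m l mid
  else l
termination_by (r - l).toNat
decreasing_by
  · have h1 : l + 1 ≤ PySem.Int.floordiv (l + r) 2 :=
      (PySem.Int.le_floordiv_iff_mul_le (by norm_num)).2 (by omega)
    omega
  · have h2 : PySem.Int.floordiv (l + r) 2 < r :=
      (PySem.Int.floordiv_lt_iff_lt_mul (by norm_num)).2 (by omega)
    have h1 : l ≤ PySem.Int.floordiv (l + r) 2 := (PySem.Int.floordiv_two_mid_bounds (by omega)).1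
    omega

def maxDistance (position : List Int) (m : Int) : Int :=
  bsA (PySem.List.sorted position (fun v => v)) m (-1) (10 ^ 10)

-- ===== PORT B =====
-- Source B's count(x): linear greedy pass over the sorted list (state (c, last)).
def countB (s : List Int) (x : Int) : Int :=
  (s.tail.foldl (fun (st : Int × Int) p => if x ≤ p - st.2 then (st.1 + 1, p) else st)
    (1, s.headI)).1

def bsB (s : List Int) (m lo hi : Int) : Int :=
  if h : lo < hi then
    let mid := PySem.Int.floordiv (lo + hi + 1) 2
    if m ≤ countB s mid then bsB s m mid hi else bsB s m lo (mid - 1)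
  else lo
termination_by (hi - lo).toNat
decreasing_by
  · have h1 : lo + 1 ≤ PySem.Int.floordiv (lo + hi + 1) 2 :=
      (PySem.Int.le_floordiv_iff_mul_le (by norm_num)).2 (by omega)
    omega
  · have h2 : PySem.Int.floordiv (lo + hi + 1) 2 ≤ hi :=
      (by have := PySem.Int.floordiv_lt_iff_lt_mul (a := lo + hi + 1) (q := hi + 1) (by norm_num : (0:Int) < 2); omega)
    have h1 : lo + 1 ≤ PySem.Int.floordiv (lo + hi + 1) 2 :=
      (PySem.Int.le_floordiv_iff_mul_le (by norm_num)).2 (by omega)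
    omega

def maxDistance_alt (position : List Int) (m : Int) : Int :=
  let s := PySem.List.sorted position (fun v => v)
  if s.isEmpty then -1
  else bsB s m 0 (s.getLastD 0 - s.headI)

-- ===== PRECONDITION & SPEC =====
-- Pre_ excludes only the inputs on which A never returns: a nonempty `position`
-- with m ≤ 1 makes A's check(0) loop forever (tot never reaches m), so A diverges.
def Pre_maxDistance (position : List Int) (m : Int) : Prop :=
  position = [] ∨ 2 ≤ m
instance (position : List Int) (m : Int) : Decidable (Pre_maxDistance position m) := by
  unfold Pre_maxDistance; infer_instance

def pvWitness_maxDistance : List Int × Int := ([5, 1, 9], 2)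

def Spec_maxDistance (position : List Int) (m : Int) (out : Int) : Prop := out = maxDistance_alt position m
instance (position : List Int) (m : Int) (out : Int) : Decidable (Spec_maxDistance position m out) := by unfold Spec_maxDistance; infer_instance

-- ===== CLAIM (what is proved, stated in full; the proofs are below) =====
def Claim_equal_maxDistance : Prop := ∀ (position : List Int) (m : Int), Dom_maxDistance position m → Pre_maxDistance position m → Spec_maxDistance position m (maxDistance position m)

-- ===== LEMMAS AND PROOFS =====

-- greedy placement count beyond the first ball, from `last`, over the remaining list
def gcount (x : Int) : Int → List Int → Int
  | _, [] => 0
  | last, p :: l => if x ≤ p - last then 1 + gcount x p l else gcount x last l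

theorem gcount_nonneg (x last : Int) (l : List Int) : 0 ≤ gcount x last l := by
  induction l generalizing last with
  | nil => simp [gcount]
  | cons p l ih => simp only [gcount]; split <;> [linarith [ih p]; exact ih last]

-- Source B's fold computes 1 + gcount
theorem foldB_eq (x : Int) (l : List Int) : ∀ (c last : Int),
    (l.foldl (fun (st : Int × Int) p => if x ≤ p - st.2 then (st.1 + 1, p) else st) (c, last)).1
      = c + gcount x last l := by
  induction l with
  | nil => simp [gcount]
  | cons p l ih =>
    intro c last
    simp only [List.foldl, gcount]
    split <;> [rw [ih (c + 1) p]; rw [ih c last]] <;> ring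

theorem countB_eq (s : List Int) (x : Int) : countB s x = 1 + gcount x s.headI s.tail := by
  simp [countB, foldB_eq]

-- no placement at all when every element is too close
theorem gcount_zero (x last : Int) (l : List Int) (h : ∀ p ∈ l, p - last < x) :
    gcount x last l = 0 := by
  induction l with
  | nil => rfl
  | cons p l ih =>
    have hp := h p (by simp)
    simp only [gcount, if_neg (by omega : ¬ x ≤ p - last)]
    exact ih (fun q hq => h q (by simp [hq]))

-- the first eligible element is the one the greedy pass places
theorem gcount_split (x last p : Int) (l₁ l₂ : List Int)
    (h₁ : ∀ q ∈ l₁, q - last < x) (hp : x ≤ p - last) :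
    gcount x last (l₁ ++ p :: l₂) = 1 + gcount x p l₂ := by
  induction l₁ with
  | nil => simp [gcount, if_pos hp]
  | cons q l₁ ih =>
    have hq := h₁ q (by simp)
    simp only [List.cons_append, gcount, if_neg (by omega : ¬ x ≤ q - last)]
    exact ih (fun r hr => h₁ r (by simp [hr]))

-- greedy monotonicity in the starting point (C1) with its companion (C2')
theorem gcount_mono_pair (x : Int) (l : List Int) :
    (∀ a b : Int, a ≤ b → gcount x b l ≤ gcount x a l) ∧
    (∀ b q : Int, q < b + x → gcount x b l ≤ 1 + gcount x q l) := by
  induction l with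
  | nil => exact ⟨fun _ _ _ => le_refl _, fun _ _ _ => by simp [gcount]⟩
  | cons p l ih =>
    obtain ⟨ih1, ih2⟩ := ih
    constructor
    · intro a b hab
      simp only [gcount]
      by_cases hb : x ≤ p - b
      · rw [if_pos hb, if_pos (by omega : x ≤ p - a)]
      · rw [if_neg hb]
        by_cases ha : x ≤ p - a
        · rw [if_pos ha]
          exact ih2 b p (by omega)
        · rw [if_neg ha]; exact ih1 a b hab
    · intro b q hqb
      simp only [gcount]
      by_cases hb : x ≤ p - b
      · rw [if_pos hb]
        by_cases hq : x ≤ p - q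
        · rw [if_pos hq]
          have := gcount_nonneg x p l
          omega
        · rw [if_neg hq]
          have : gcount x p l ≤ gcount x q l := ih1 q p (by omega)
          omega
      · rw [if_neg hb]
        by_cases hq : x ≤ p - q
        · rw [if_pos hq]
          have : gcount x b l ≤ 1 + gcount x p l := ih2 b p (by omega)
          omega
        · rw [if_neg hq]; exact ih2 b q hqb

-- greedy antitone in the required gap
theorem gcount_anti (l : List Int) : ∀ (a x y : Int), x ≤ y → gcount y a l ≤ gcount x a l := by
  induction l with
  | nil => intro a x y _; simp [gcount]
  | cons p l ih =>
    intro a x y hxy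
    simp only [gcount]
    by_cases hy : y ≤ p - a
    · rw [if_pos hy, if_pos (by omega : x ≤ p - a)]
      have := ih p x y hxy
      omega
    · rw [if_neg hy]
      by_cases hx : x ≤ p - a
      · rw [if_pos hx]
        have h1 : gcount y a l ≤ 1 + gcount y p l := (gcount_mono_pair y l).2 a p (by omega)
        have h2 : gcount y p l ≤ gcount x p l := ih p x y hxy
        omega
      · rw [if_neg hx]; exact ih a x y hxy


-- every element sits below the last one of a ≤-sorted list
theorem pairwise_le_getLastD (a : Int) (t : List Int)
    (hp : List.Pairwise (· ≤ ·) (a :: t)) :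
    ∀ p ∈ a :: t, p ≤ (a :: t).getLastD 0 := by
  induction t generalizing a with
  | nil => intro p hp'; simp at hp' ⊢; omega
  | cons b t ih =>
    intro p hmem
    have hp' : List.Pairwise (· ≤ ·) (b :: t) := hp.sublist (by simp)
    have hab : a ≤ b := (List.pairwise_cons.1 hp).1 b (by simp)
    rcases List.mem_cons.1 hmem with rfl | hmem'
    · have := ih b hp' b (by simp)
      simpa using le_trans hab (by simpa using this)
    · simpa using ih b hp' p hmem'

theorem pairwise_le_getLastD' (s : List Int) (hs : s ≠ [])
    (hp : List.Pairwise (· ≤ ·) s) : ∀ p ∈ s, p ≤ s.getLastD 0 := by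
  match s with
  | [] => exact absurd rfl hs
  | a :: t => exact pairwise_le_getLastD a t hp

theorem getLastD_mem (s : List Int) (hs : s ≠ []) : s.getLastD 0 ∈ s := by
  rw [List.getLastD_eq_getLast?, List.getLast?_eq_getLast hs]
  exact List.getLast_mem hs

-- A's check on an empty list is False
theorem checkALoop_nil (m x : Int) (fuel : Nat) (tot : Int) (cur : Nat) :
    checkALoop [] m x fuel tot cur = false := by
  cases fuel <;> simp [checkALoop]

-- A's check with a non-positive gap: the cursor can never run off the end, and
-- tot counts up every iteration, so check returns True as soon as tot hits m
theorem checkALoop_nonpos (s : List Int) (m x : Int)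
    (hp : List.Pairwise (· ≤ ·) s) (hx : x ≤ 0) :
    ∀ (fuel : Nat) (tot : Int) (cur : Nat), cur < s.length → tot < m →
      m ≤ tot + fuel → checkALoop s m x fuel tot cur = true := by
  intro fuel
  induction fuel with
  | zero => intro tot cur _ h2 h3; simp at h3 ⊢; omega
  | succ fuel ih =>
    intro tot cur hcur htot hfuel
    obtain ⟨hle, hlt, hge⟩ := PySem.List.bisectLeft_spec s (s[cur] + x) hp
    have hj : PySem.List.bisectLeft s (s[cur] + x) ≤ cur := by
      by_contra hc
      have := hlt cur hcur (by omega)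
      omega
    simp only [checkALoop, dif_pos hcur, if_neg (by omega : ¬ s.length ≤ PySem.List.bisectLeft s (s[cur] + x))]
    by_cases he : tot + 1 = m
    · simp [he]
    · rw [if_neg he]
      exact ih (tot + 1) _ (by omega) (by omega) (by push_cast at hfuel ⊢; omega)

-- A's check with gap ≥ 1 equals "tot plus the linear greedy count reaches m"
theorem checkALoop_pos (s : List Int) (m x : Int)
    (hp : List.Pairwise (· ≤ ·) s) (hx : 1 ≤ x) :
    ∀ (fuel : Nat) (tot : Int) (cur : Nat) (hcur : cur < s.length), tot < m →
      s.length ≤ fuel + cur →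
      checkALoop s m x fuel tot cur
        = decide (m ≤ tot + gcount x s[cur] (s.drop (cur + 1))) := by
  intro fuel
  induction fuel with
  | zero => intro tot cur h1 h2 h3; omega
  | succ fuel ih =>
    intro tot cur hcur htot hfuel
    obtain ⟨hle, hlt, hge⟩ := PySem.List.bisectLeft_spec s (s[cur] + x) hp
    set j := PySem.List.bisectLeft s (s[cur] + x) with hjdef
    by_cases hj : s.length ≤ j
    · -- nothing ≥ s[cur]+x exists: greedy places nobody either
      have hzero : gcount x s[cur] (s.drop (cur + 1)) = 0 := by
        apply gcount_zero
        intro p hpmem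
        obtain ⟨i, hi, hpi⟩ := List.mem_iff_getElem.1 hpmem
        rw [List.length_drop] at hi
        rw [List.getElem_drop] at hpi
        have := hlt (cur + 1 + i) (by omega) (by omega)
        omega
      simp only [checkALoop, dif_pos hcur]
      rw [← hjdef, if_pos hj, hzero]
      exact (decide_eq_false (by omega : ¬ (m ≤ tot + 0))).symm
    · rw [not_le] at hj
      have hcurj : cur < j := by
        by_contra hc
        have := hge cur hcur (by omega)
        omega
      have hsj : s[cur] + x ≤ s[j] := hge j hj le_rfl
      -- split the suffix at index j: elements before j are all < s[cur]+x
      have hsplit : s.drop (cur + 1)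
          = (s.drop (cur + 1)).take (j - (cur + 1)) ++ s[j] :: s.drop (j + 1) := by
        conv_lhs => rw [← List.take_append_drop (j - (cur + 1)) (s.drop (cur + 1))]
        rw [List.drop_drop, (by omega : cur + 1 + (j - (cur + 1)) = j),
          List.drop_eq_getElem_cons hj]
      have hgs : gcount x s[cur] (s.drop (cur + 1)) = 1 + gcount x s[j] (s.drop (j + 1)) := by
        rw [hsplit]
        apply gcount_split
        · intro q hq
          obtain ⟨i, hi, hqi⟩ := List.mem_iff_getElem.1 hq
          have hi' : i < j - (cur + 1) := by
            have := hi
            simp [List.length_take] at this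
            omega
          rw [List.getElem_take, List.getElem_drop] at hqi
          have := hlt (cur + 1 + i) (by
            have : j ≤ s.length := hle
            omega) (by omega)
          omega
        · omega
      simp only [checkALoop, dif_pos hcur]
      rw [← hjdef, if_neg (by omega : ¬ s.length ≤ j)]
      by_cases he : tot + 1 = m
      · rw [if_pos he]
        have := gcount_nonneg x s[j] (s.drop (j + 1))
        simp [hgs]; omega
      · rw [if_neg he]
        rw [ih (tot + 1) j hj (by omega) (by omega), hgs]
        rw [decide_eq_decide]
        omega

theorem checkA_nonpos (s : List Int) (m x : Int) (hs : s ≠ [])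
    (hp : List.Pairwise (· ≤ ·) s) (hm : 2 ≤ m) (hx : x ≤ 0) :
    checkA s m x = true := by
  exact checkALoop_nonpos s m x hp hx _ 1 0
    (by cases s with | nil => exact absurd rfl hs | cons a t => simp)
    (by omega) (by omega)

theorem checkA_pos (s : List Int) (m x : Int) (hs : s ≠ [])
    (hp : List.Pairwise (· ≤ ·) s) (hm : 2 ≤ m) (hx : 1 ≤ x) :
    checkA s m x = decide ((m : Int) ≤ countB s x) := by
  have h0 : 0 < s.length := by
    cases s with | nil => exact absurd rfl hs | cons a t => simp
  rw [checkA, checkALoop_pos s m x hp hx _ 1 0 h0 (by omega) (by omega),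
    countB_eq]
  have hh : s[0] = s.headI := by
    cases s with | nil => exact absurd rfl hs | cons a t => rfl
  have ht : s.drop 1 = s.tail := by cases s <;> rfl
  rw [hh, ht]

-- the feasibility predicate is antitone in the gap
theorem pred_anti (s : List Int) (m x y : Int) (hxy : x ≤ y)
    (h : (m : Int) ≤ countB s y) : (m : Int) ≤ countB s x := by
  rw [countB_eq] at h ⊢
  have := gcount_anti s.tail s.headI x y hxy
  omega

-- A's binary search: invariant check(l)=True (or l = -1 start), check(r)=False
theorem bsA_inv (s : List Int) (m : Int) :
    ∀ (n : Nat) (l r : Int), (r - l).toNat ≤ n → l + 1 ≤ r →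
      (l = -1 ∨ checkA s m l = true) → checkA s m r = false →
      (bsA s m l r = -1 ∨ checkA s m (bsA s m l r) = true) ∧
        checkA s m (bsA s m l r + 1) = false ∧ l ≤ bsA s m l r ∧ bsA s m l r + 1 ≤ r := by
  intro n
  induction n with
  | zero => intro l r h1 h2 _ _; omega
  | succ n ih =>
    intro l r hn hlr hl hr
    by_cases h : l + 1 < r
    · have hmid1 : l + 1 ≤ PySem.Int.floordiv (l + r) 2 :=
        (PySem.Int.le_floordiv_iff_mul_le (by norm_num)).2 (by omega)
      have hmid2 : PySem.Int.floordiv (l + r) 2 < r :=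
        (PySem.Int.floordiv_lt_iff_lt_mul (by norm_num)).2 (by omega)
      rw [bsA, dif_pos h]
      by_cases hc : checkA s m (PySem.Int.floordiv (l + r) 2) = true
      · rw [if_pos hc]
        have := ih (PySem.Int.floordiv (l + r) 2) r (by omega) (by omega) (Or.inr hc) hr
        exact ⟨this.1, this.2.1, by omega, this.2.2.2⟩
      · rw [if_neg hc]
        have := ih l (PySem.Int.floordiv (l + r) 2) (by omega) (by omega) hl
          (by simpa using hc)
        exact ⟨this.1, this.2.1, this.2.2.1, by omega⟩
    · rw [bsA, dif_neg h]
      have : r = l + 1 := by omega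
      exact ⟨hl, by rw [this] at hr; exact hr, le_rfl, by omega⟩

-- B's binary search: invariant count(lo) ≥ m (or lo = 0 start), count(hi+1) < m
theorem bsB_inv (s : List Int) (m : Int) :
    ∀ (n : Nat) (lo hi : Int), (hi - lo).toNat ≤ n → 0 ≤ lo → lo ≤ hi →
      (lo = 0 ∨ (m : Int) ≤ countB s lo) → ¬ ((m : Int) ≤ countB s (hi + 1)) →
      (bsB s m lo hi = 0 ∨ (m : Int) ≤ countB s (bsB s m lo hi)) ∧
        ¬ ((m : Int) ≤ countB s (bsB s m lo hi + 1)) ∧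
        lo ≤ bsB s m lo hi ∧ bsB s m lo hi ≤ hi := by
  intro n
  induction n with
  | zero =>
    intro lo hi h1 h2 h3 hlo hhi
    have hhilo : hi = lo := by omega
    rw [hhilo] at hhi ⊢
    rw [bsB, dif_neg (lt_irrefl lo)]
    exact ⟨hlo, hhi, le_rfl, le_rfl⟩
  | succ n ih =>
    intro lo hi hn h0 hlohi hlo hhi
    by_cases h : lo < hi
    · have hmid1 : lo + 1 ≤ PySem.Int.floordiv (lo + hi + 1) 2 :=
        (PySem.Int.le_floordiv_iff_mul_le (by norm_num)).2 (by omega)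
      have hmid2 : PySem.Int.floordiv (lo + hi + 1) 2 ≤ hi := by
        have := (PySem.Int.floordiv_lt_iff_lt_mul (a := lo + hi + 1) (q := hi + 1)
          (by norm_num : (0:Int) < 2))
        omega
      rw [bsB, dif_pos h]
      by_cases hc : (m : Int) ≤ countB s (PySem.Int.floordiv (lo + hi + 1) 2)
      · rw [if_pos hc]
        have := ih (PySem.Int.floordiv (lo + hi + 1) 2) hi (by omega) (by omega)
          (by omega) (Or.inr hc) hhi
        exact ⟨this.1, this.2.1, by omega, this.2.2.2⟩
      · rw [if_neg hc]
        have := ih lo (PySem.Int.floordiv (lo + hi + 1) 2 - 1) (by omega) h0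
          (by omega) hlo (by simpa using hc)
        exact ⟨this.1, this.2.1, this.2.2.1, by omega⟩
    · have hhilo : hi = lo := by omega
      rw [hhilo] at hhi ⊢
      rw [bsB, dif_neg (lt_irrefl lo)]
      exact ⟨hlo, hhi, le_rfl, le_rfl⟩

theorem maxDistance_spec : Claim_equal_maxDistance := by
  unfold Claim_equal_maxDistance
  intro position m hdom hpre
  unfold Spec_maxDistance maxDistance maxDistance_alt
  set s := PySem.List.sorted position (fun v => v) with hsdef
  show bsA s m (-1) (10 ^ 10)
    = if s.isEmpty = true then -1 else bsB s m 0 (s.getLastD 0 - s.headI)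
  have hperm : s.Perm position := PySem.List.sorted_perm position (fun v => v) false
  have hp : List.Pairwise (· ≤ ·) s := by
    simpa using PySem.List.sorted_pairwise position (fun v => v)
  by_cases hs : s = []
  · -- empty list: A's check is always False, the search collapses to -1
    rw [hs]
    have hck : ∀ x : Int, checkA [] m x = false := fun x => checkALoop_nil m x _ 1 0
    have := bsA_inv [] m ((10 ^ 10 - (-1)).toNat) (-1) (10 ^ 10) (by norm_num)
      (by norm_num) (Or.inl rfl) (hck _)
    rcases this.1 with h | h
    · simpa using h
    · rw [hck] at h; exact absurd h (by simp)
  · have hposne : position ≠ [] := by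
      intro hc
      rw [hc] at hperm
      exact hs hperm.eq_nil
    have hm : 2 ≤ m := by
      rcases hpre with h | h
      · exact absurd h hposne
      · exact h
    -- element bounds from Dom
    have hbound : ∀ p ∈ s, -2147483648 ≤ p ∧ p ≤ 2147483648 := by
      intro p hpm
      have hpm' : p ∈ position := (PySem.List.mem_sorted _ _ _ _).1 hpm
      have hdom' := hdom
      unfold Dom_maxDistance at hdom'
      rw [Bool.and_eq_true] at hdom'
      have := List.all_eq_true.1 hdom'.1 p hpm'
      simpa [pvDomInt] using this
    have h0 : 0 < s.length := List.length_pos_iff.2 hs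
    have hlast : ∀ p ∈ s, p ≤ s.getLastD 0 := pairwise_le_getLastD' s hs hp
    have hheadmem : s.headI ∈ s := by
      obtain ⟨a, t, hst⟩ := List.exists_cons_of_ne_nil hs
      rw [hst]; simp
    have htailmem : ∀ p ∈ s.tail, p ∈ s := fun p hpm => List.tail_subset s hpm
    set span := s.getLastD 0 - s.headI with hspan
    have hspan0 : 0 ≤ span := by
      have := hlast s.headI hheadmem
      omega
    -- gap larger than the span (in particular 10^10): greedy places nobody
    have hbig : ∀ x : Int, span < x → ¬ ((m : Int) ≤ countB s x) := by
      intro x hx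
      rw [countB_eq, gcount_zero x s.headI s.tail (by
        intro p hpm
        have := hlast p (htailmem p hpm)
        omega)]
      omega
    have hrfalse : checkA s m (10 ^ 10) = false := by
      rw [checkA_pos s m _ hs hp hm (by norm_num)]
      simp only [decide_eq_false_iff_not]
      apply hbig
      have h1 := hbound s.headI hheadmem
      have h2 : s.getLastD 0 ≤ 2147483648 := (hbound _ (getLastD_mem s hs)).2
      omega
    have hA := bsA_inv s m ((10 ^ 10 - (-1)).toNat) (-1) (10 ^ 10) (by norm_num)
      (by norm_num) (Or.inl rfl) hrfalse
    set a := bsA s m (-1) (10 ^ 10) with hadef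
    have ha0 : 0 ≤ a := by
      rcases hA.1 with h | h
      · exfalso
        have : checkA s m (a + 1) = true := by
          apply checkA_nonpos s m _ hs hp hm; omega
        rw [hA.2.1] at this; exact absurd this (by simp)
      · by_contra hc
        have : checkA s m a = true := checkA_nonpos s m a hs hp hm (by omega)
        -- a ≥ -1 always; if a = -1 then checkA (a+1) = checkA 0 = true contradicts
        have h01 : checkA s m (a + 1) = true := by
          by_cases hx : a + 1 ≤ 0
          · exact checkA_nonpos s m _ hs hp hm hx
          · omega
        rw [hA.2.1] at h01; exact absurd h01 (by simp)
    have hB := bsB_inv s m (span - 0).toNat 0 span (by omega) le_rfl hspan0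
      (Or.inl rfl) (hbig (span + 1) (by omega))
    set v := bsB s m 0 span with hvdef
    -- A's boundary facts translated to the count predicate
    have hAnot : ¬ ((m : Int) ≤ countB s (a + 1)) := by
      have := hA.2.1
      rw [checkA_pos s m (a + 1) hs hp hm (by omega)] at this
      simpa using this
    have hAyes : a = 0 ∨ (m : Int) ≤ countB s a := by
      by_cases hz : a = 0
      · exact Or.inl hz
      · right
        rcases hA.1 with h | h
        · omega
        · rw [checkA_pos s m a hs hp hm (by omega)] at h
          simpa using h
    -- uniqueness: both a and v are THE boundary of the antitone predicate
    have hav : a = v := by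
      rcases lt_trichotomy a v with h | h | h
      · exfalso
        rcases hB.1 with hv0 | hvy
        · omega
        · exact hAnot (pred_anti s m (a + 1) v (by omega) hvy)
      · exact h
      · exfalso
        rcases hAyes with ha0' | hay
        · omega
        · exact hB.2.1 (pred_anti s m (v + 1) a (by omega) hay)
    rw [if_neg (by simpa [List.isEmpty_iff] using hs)]
    omega
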